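-- pv_equiv track=rewrite | github.com/jkbstepien/ASD-2021 | dynamic_programming/exercises/05_05_maximin.py | maximin
-- ===== SOURCE A (Python) =====
-- def maximin(A, k):
--     """
--     Problem można rozważać na przykładzie robotników i fragmentów płotu, który
--     mają pomalować.
--     Wówczas nasza funkcja F będzie wyglądać:
--         F(i, t) = maksymalna wartość podziału a_0, ...,a_i na t ciągów.
--         t utożsamiamy z robotnikiem/ami malującymi fragment płotu.
--     Niech x - indeks tablicy A:
--         F(i, t) = min( F(i - x, t - 1), suma od j=x+1 do i: A[j] )
--     """
--     n = len(A)
--     F = [[0 for _ in range(k + 1)] for _ in range(n)]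
--
--     # Calculate sums of coherent subsequences (i,...,j).
--     prefix_sums = [[0 for _ in range(n)] for _ in range(n)]
--     for i in range(n):
--         prefix_sums[i][i] = A[i]
--         for j in range(i + 1, n):
--             prefix_sums[i][j] = prefix_sums[i][j - 1] + A[j]
--
--     # Initialize F's first column with pref-sums of A.
--     # For one worker it is always sum of whole A array.
--     F[0][1] = A[0]
--     for i in range(1, n):
--         F[i][1] = F[i - 1][1] + A[i]
--
--     for i in range(n):
--         for t in range(1, k + 1):
--             for j in range(1, i + 1):
--                 F[i][t] = max(F[i][t], min(F[i - j][t - 1], prefix_sums[i - j + 1][i]))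
--
--     return F[n - 1][k], F
-- ===== SOURCE B (Python) =====
-- def _cell(S, M, i, t):
--     if t == 0:
--         return 0
--     v = M[i][t]
--     if v is None:
--         v = S[i + 1] if t == 1 else 0
--         for m in range(i):
--             c = min(_cell(S, M, m, t - 1), S[i + 1] - S[m + 1])
--             if c > v:
--                 v = c
--         M[i][t] = v
--     return v
--
--
-- def maximin(A, k):
--     n = len(A)
--     S = [0]
--     for x in A:
--         S.append(S[-1] + x)
--     M = [[None] * (k + 1) for _ in range(n)]
--     F = [[_cell(S, M, i, t) for t in range(k + 1)] for i in range(n)]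
--     return F[n - 1][k], F
-- ===== Notes on version B (the rewrite author's own statement) =====
-- stated objective: alternative
-- what changed: B computes the table by top-down memoized recursion _cell(S, M, i, t) over a single 1-D prefix-sum array with a None-sentinel memo table filled on demand, replacing A's bottom-up in-place triple loop that first materialises an n-by-n table of all contiguous-subarray sums; same asymptotic cost, O(n) instead of O(n^2) auxiliary space for the sums.
import Mathlib
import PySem

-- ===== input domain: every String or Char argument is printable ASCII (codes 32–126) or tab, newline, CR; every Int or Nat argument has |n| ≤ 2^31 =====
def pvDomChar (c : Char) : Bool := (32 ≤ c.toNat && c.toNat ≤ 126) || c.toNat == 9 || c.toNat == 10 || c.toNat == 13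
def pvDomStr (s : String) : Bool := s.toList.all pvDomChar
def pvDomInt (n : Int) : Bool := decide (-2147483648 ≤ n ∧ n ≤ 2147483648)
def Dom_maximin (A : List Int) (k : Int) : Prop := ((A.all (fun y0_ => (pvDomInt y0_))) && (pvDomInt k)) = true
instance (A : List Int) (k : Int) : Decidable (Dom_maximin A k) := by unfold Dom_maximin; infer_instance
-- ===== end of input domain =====

-- B replaces A's bottom-up triple loop over an n×n table of all subarray sums by top-down
-- memoized recursion on (cell, workers) over a 1-D prefix-sum array; same values on all of Pre_.

-- ===== PORT A =====
-- nested-list helpers for A's table ('M[i][j]' and 'M[i][j] = v'; indices in range under Pre_)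
def get2 (M : List (List Int)) (i j : Nat) : Int := (M.getD i []).getD j 0
def set2 (M : List (List Int)) (i j : Nat) (v : Int) : List (List Int) :=
  M.set i ((M.getD i []).set j v)

def maximin (A : List Int) (k : Int) : Int × List (List Int) :=
  let n := A.length
  let F0 : List (List Int) := List.replicate n (List.replicate (k+1).toNat 0)
  let ps0 : List (List Int) := List.replicate n (List.replicate n 0)
  let ps := (List.range n).foldl (fun ps i =>
      (List.range' (i+1) (n - (i+1))).foldl
        (fun ps j => set2 ps i j (get2 ps i (j-1) + A.getD j 0))
        (set2 ps i i (A.getD i 0))) ps0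
  let F1 := (List.range' 1 (n-1)).foldl
      (fun F i => set2 F i 1 (get2 F (i-1) 1 + A.getD i 0))
      (set2 F0 0 1 (A.getD 0 0))
  let F2 := (List.range n).foldl (fun F i =>
      (List.range' 1 k.toNat).foldl (fun F t =>
        (List.range' 1 i).foldl (fun F j =>
          set2 F i t (max (get2 F i t) (min (get2 F (i-j) (t-1)) (get2 ps (i-j+1) i)))) F) F) F1
  (get2 F2 (n-1) k.toNat, F2)

-- ===== PORT B =====
-- Source B's '_cell(S, M, i, t)': recursion on t (the python recursion decreases t); the
-- None-sentinel memo table M is threaded in place of Python's in-place mutation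
def cellB (S : List Int) : Nat → Nat → List (List (Option Int)) →
    Int × List (List (Option Int))
  | 0, _, M => (0, M)
  | t+1, i, M =>
    match (M.getD i []).getD (t+1) none with
    | some v => (v, M)
    | none =>
      let init : Int := if t+1 = 1 then S.getD (i+1) 0 else 0
      let r := (List.range i).foldl
          (fun (p : Int × List (List (Option Int))) m =>
            let q := cellB S t m p.2
            let c := min q.1 (S.getD (i+1) 0 - S.getD (m+1) 0)
            (if c > p.1 then c else p.1, q.2)) (init, M)
      (r.1, r.2.set i ((r.2.getD i []).set (t+1) (some r.1)))

def maximin_alt (A : List Int) (k : Int) : Int × List (List Int) :=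
  let n := A.length
  let S := A.foldl (fun acc x => acc ++ [acc.getLastD 0 + x]) [0]
  let M0 : List (List (Option Int)) := List.replicate n (List.replicate (k+1).toNat none)
  let r := (List.range n).foldl
      (fun (p : List (List Int) × List (List (Option Int))) i =>
        let row := (List.range (k+1).toNat).foldl
            (fun (q : List Int × List (List (Option Int))) t =>
              let c := cellB S t i q.2
              (q.1 ++ [c.1], c.2)) ([], p.2)
        (p.1 ++ [row.1], row.2)) ([], M0)
  (get2 r.1 (n-1) k.toNat, r.1)

-- ===== PRECONDITION & SPEC =====
-- Python A raises IndexError on A = [] (F[0][1] on an empty F) and on k < 1 (column index 1 /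
-- index k out of range); those are exactly the inputs excluded here.
def Pre_maximin (A : List Int) (k : Int) : Prop := A ≠ [] ∧ 1 ≤ k
instance (A : List Int) (k : Int) : Decidable (Pre_maximin A k) := by unfold Pre_maximin; infer_instance
def pvWitness_maximin : List Int × Int := ([3, -2, 5, 1], 2)

def Spec_maximin (A : List Int) (k : Int) (out : Int × List (List Int)) : Prop := out = maximin_alt A k
instance (A : List Int) (k : Int) (out : Int × List (List Int)) : Decidable (Spec_maximin A k out) := by unfold Spec_maximin; infer_instance

-- ===== CLAIM (what is proved, stated in full; the proofs are below) =====
def Claim_equal_maximin : Prop := ∀ (A : List Int) (k : Int), Dom_maximin A k → Pre_maximin A k → Spec_maximin A k (maximin A k)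

-- ===== LEMMAS AND PROOFS =====

-- sum of A[0:i]
def pref (A : List Int) (i : Nat) : Int := (A.take i).sum

-- the common DP value: specCell A t i = the final value of F[i][t]
def specCell (A : List Int) : Nat → Nat → Int
  | 0, _ => 0
  | t+1, i => (List.range i).foldl
      (fun v m => max v (min (specCell A t m) (pref A (i+1) - pref A (m+1))))
      (if t = 0 then pref A (i+1) else 0)

def specRow (A : List Int) (K i : Nat) : List Int := (List.range K).map (fun t => specCell A t i)
def specTable (A : List Int) (K n : Nat) : List (List Int) := (List.range n).map (specRow A K)

-- basic list-cell lemmas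
theorem getD_set_self {α : Type} (l : List α) (i : Nat) (v d : α) (h : i < l.length) :
    (l.set i v).getD i d = v := by
  rw [List.getD_eq_getElem?_getD, List.getElem?_set_self h]; rfl

theorem getD_set_ne {α : Type} (l : List α) (i j : Nat) (v d : α) (h : i ≠ j) :
    (l.set i v).getD j d = l.getD j d := by
  rw [List.getD_eq_getElem?_getD, List.getElem?_set_ne h, ← List.getD_eq_getElem?_getD]

theorem set_map_range {β : Type} (f : Nat → β) (n c : Nat) (v : β) :
    ((List.range n).map f).set c v = (List.range n).map (fun a => if a = c then v else f a) := by
  apply List.ext_getElem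
  · simp
  · intro i h1 h2
    simp only [List.getElem_set, List.getElem_map, List.getElem_range]
    by_cases h : c = i
    · subst h; simp
    · rw [if_neg h, if_neg (fun hh => h hh.symm)]

theorem getD_map_range' {β : Type} (f : Nat → β) (n i : Nat) (d : β) (h : i < n) :
    ((List.range n).map f).getD i d = f i := PySem.List.getD_map_range f n i d h

theorem pref_succ (A : List Int) (i : Nat) (h : i < A.length) :
    pref A (i+1) = pref A i + A.getD i 0 := by
  unfold pref
  rw [List.sum_take_succ A i h, List.getD_eq_getElem?_getD, List.getElem?_eq_getElem h]
  rfl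

-- ===== B-side =====
theorem scanP (l : List Int) : ∀ (acc : List Int), acc ≠ [] →
    l.foldl (fun a x => a ++ [a.getLastD 0 + x]) acc
    = acc ++ (List.range l.length).map (fun i => acc.getLastD 0 + (l.take (i+1)).sum) := by
  induction l with
  | nil => simp
  | cons x xs ih =>
    intro acc hacc
    simp only [List.foldl_cons]
    rw [ih (acc ++ [acc.getLastD 0 + x]) (by simp)]
    rw [List.getLastD_concat]
    simp only [List.length_cons, List.range_succ_eq_map, List.map_cons, List.map_map]
    simp [Function.comp, List.take_succ_cons, add_assoc]

theorem P_eq (A : List Int) :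
    A.foldl (fun a x => a ++ [a.getLastD 0 + x]) [0]
    = (List.range (A.length+1)).map (pref A) := by
  rw [scanP A [0] (by simp)]
  simp only [List.range_succ_eq_map, List.map_cons, List.map_map]
  simp [pref, Function.comp]

theorem maxIf (v c : Int) : (if c > v then c else v) = max v c := by
  split <;> omega

-- memo consistency: every stored value is the spec value of its cell
def MemoOK (A : List Int) (M : List (List (Option Int))) : Prop :=
  ∀ i t v, (M.getD i []).getD t none = some v → v = specCell A t i

theorem memoOK_init (A : List Int) (n K : Nat) :
    MemoOK A (List.replicate n (List.replicate K (none : Option Int))) := by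
  intro i t v h
  have hrow : (List.replicate n (List.replicate K (none : Option Int))).getD i []
      = if i < n then List.replicate K none else [] := by
    rw [List.getD_eq_getElem?_getD, List.getElem?_replicate]
    split <;> rfl
  rw [hrow] at h
  split at h
  · rw [List.getD_eq_getElem?_getD, List.getElem?_replicate] at h
    split at h <;> simp at h
  · simp [List.getD] at h

theorem memoOK_set (A : List Int) (M : List (List (Option Int))) (i t : Nat) (x : Int)
    (hM : MemoOK A M) (hx : x = specCell A t i) :
    MemoOK A (M.set i ((M.getD i []).set t (some x))) := by
  intro i' t' v h
  by_cases hii : i' = i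
  · subst hii
    by_cases hlen : i' < M.length
    · rw [getD_set_self M i' _ [] hlen] at h
      by_cases htt : t' = t
      · subst htt
        by_cases hrlen : t' < (M.getD i' []).length
        · rw [getD_set_self _ t' _ none hrlen] at h
          cases h
          exact hx
        · rw [List.set_eq_of_length_le (by omega)] at h
          exact hM i' t' v h
      · rw [getD_set_ne _ t t' _ none (fun hh => htt hh.symm)] at h
        exact hM i' t' v h
    · rw [List.set_eq_of_length_le (by omega)] at h
      exact hM i' t' v h
  · rw [getD_set_ne M i i' _ [] (fun hh => hii hh.symm)] at h
    exact hM i' t' v h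

theorem cellB_spec (A S : List Int)
    (hS : ∀ j, j ≤ A.length → S.getD j 0 = pref A j) :
    ∀ (t i : Nat) (memo : List (List (Option Int))), i < A.length → MemoOK A memo →
      (cellB S t i memo).1 = specCell A t i ∧ MemoOK A (cellB S t i memo).2 := by
  intro t
  induction t with
  | zero => intro i memo _ hm; exact ⟨rfl, hm⟩
  | succ t ih =>
    intro i memo hi hm
    cases hget : (memo.getD i []).getD (t+1) none with
    | some v =>
      simp only [cellB, hget]
      exact ⟨hm i (t+1) v hget, hm⟩
    | none =>
      have fold : ∀ (l : List Nat), (∀ m ∈ l, m < i) → ∀ (v0 : Int)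
          (d : List (List (Option Int))), MemoOK A d →
          (l.foldl (fun (p : Int × List (List (Option Int))) m =>
              let q := cellB S t m p.2
              let c := min q.1 (S.getD (i+1) 0 - S.getD (m+1) 0)
              (if c > p.1 then c else p.1, q.2)) (v0, d)).1
            = l.foldl (fun v m =>
                max v (min (specCell A t m) (pref A (i+1) - pref A (m+1)))) v0
          ∧ MemoOK A (l.foldl (fun (p : Int × List (List (Option Int))) m =>
              let q := cellB S t m p.2
              let c := min q.1 (S.getD (i+1) 0 - S.getD (m+1) 0)
              (if c > p.1 then c else p.1, q.2)) (v0, d)).2 := by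
        intro l
        induction l with
        | nil => intro _ v0 d hd; exact ⟨rfl, hd⟩
        | cons m l ihl =>
          intro hml v0 d hd
          have hmi : m < i := hml m (by simp)
          obtain ⟨hc1, hc2⟩ := ih m d (by omega) hd
          have hfst : (if min (cellB S t m d).1 (S.getD (i+1) 0 - S.getD (m+1) 0) > v0
              then min (cellB S t m d).1 (S.getD (i+1) 0 - S.getD (m+1) 0) else v0)
              = max v0 (min (specCell A t m) (pref A (i+1) - pref A (m+1))) := by
            rw [hc1, hS (i+1) (by omega), hS (m+1) (by omega), maxIf]
          simp only [List.foldl_cons]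
          rw [hfst]
          exact ihl (fun m' hm' => hml m' (by simp [hm'])) _ _ hc2
      obtain ⟨h1, h2⟩ := fold (List.range i) (fun m hm' => List.mem_range.mp hm')
        (if t+1 = 1 then S.getD (i+1) 0 else 0) memo hm
      have hv0 : (if t+1 = 1 then S.getD (i+1) 0 else 0)
          = (if t = 0 then pref A (i+1) else 0) := by
        by_cases h0 : t = 0
        · rw [if_pos (by omega), if_pos h0, hS (i+1) (by omega)]
        · rw [if_neg (by omega), if_neg h0]
      have hval : (cellB S (t+1) i memo).1 = specCell A (t+1) i := by
        simp only [cellB, hget]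
        rw [h1, hv0]
        rfl
      refine ⟨hval, ?_⟩
      have hmem : (cellB S (t+1) i memo).2
          = ((List.range i).foldl (fun (p : Int × List (List (Option Int))) m =>
              let q := cellB S t m p.2
              let c := min q.1 (S.getD (i+1) 0 - S.getD (m+1) 0)
              (if c > p.1 then c else p.1, q.2))
              ((if t+1 = 1 then S.getD (i+1) 0 else 0), memo)).2.set i
              ((((List.range i).foldl (fun (p : Int × List (List (Option Int))) m =>
                let q := cellB S t m p.2
                let c := min q.1 (S.getD (i+1) 0 - S.getD (m+1) 0)
                (if c > p.1 then c else p.1, q.2))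
                ((if t+1 = 1 then S.getD (i+1) 0 else 0), memo)).2.getD i []).set (t+1)
                (some (cellB S (t+1) i memo).1)) := by
        simp only [cellB, hget]
      rw [hmem, hval]
      exact memoOK_set A _ i (t+1) _ h2 rfl

theorem tabfold (A S : List Int) (K : Nat)
    (hS : ∀ j, j ≤ A.length → S.getD j 0 = pref A j) :
    ∀ (l : List Nat), (∀ i ∈ l, i < A.length) → ∀ (acc : List (List Int))
      (d : List (List (Option Int))), MemoOK A d →
      (l.foldl (fun (p : List (List Int) × List (List (Option Int))) i =>
          let row := (List.range K).foldl
              (fun (q : List Int × List (List (Option Int))) t =>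
                let c := cellB S t i q.2
                (q.1 ++ [c.1], c.2)) ([], p.2)
          (p.1 ++ [row.1], row.2)) (acc, d)).1
        = acc ++ l.map (specRow A K)
      ∧ MemoOK A (l.foldl (fun (p : List (List Int) × List (List (Option Int))) i =>
          let row := (List.range K).foldl
              (fun (q : List Int × List (List (Option Int))) t =>
                let c := cellB S t i q.2
                (q.1 ++ [c.1], c.2)) ([], p.2)
          (p.1 ++ [row.1], row.2)) (acc, d)).2 := by
  intro l
  induction l with
  | nil =>
    intro _ acc d hd
    refine ⟨by simp, hd⟩
  | cons i l ihl =>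
    intro hl acc d hd
    have hi : i < A.length := hl i (by simp)
    have rowfold : ∀ (lt : List Nat) (racc : List Int)
        (d0 : List (List (Option Int))), MemoOK A d0 →
        (lt.foldl (fun (q : List Int × List (List (Option Int))) t =>
            let c := cellB S t i q.2
            (q.1 ++ [c.1], c.2)) (racc, d0)).1
          = racc ++ lt.map (fun t => specCell A t i)
        ∧ MemoOK A (lt.foldl (fun (q : List Int × List (List (Option Int))) t =>
            let c := cellB S t i q.2
            (q.1 ++ [c.1], c.2)) (racc, d0)).2 := by
      intro lt
      induction lt with
      | nil =>
        intro racc d0 hd0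
        refine ⟨by simp, hd0⟩
      | cons t lt ihr =>
        intro racc d0 hd0
        obtain ⟨hc1, hc2⟩ := cellB_spec A S hS t i d0 hi hd0
        simp only [List.foldl_cons]
        rw [hc1]
        obtain ⟨hr1, hr2⟩ := ihr (racc ++ [specCell A t i]) _ hc2
        refine ⟨?_, hr2⟩
        rw [hr1]
        simp
    obtain ⟨hr1, hr2⟩ := rowfold (List.range K) [] d hd
    simp only [List.foldl_cons]
    rw [hr1, List.nil_append]
    obtain ⟨ht1, ht2⟩ := ihl (fun i' hi' => hl i' (by simp [hi'])) (acc ++ [(List.range K).map (fun t => specCell A t i)]) _ hr2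
    refine ⟨?_, ht2⟩
    rw [ht1]
    simp [specRow]

theorem alt_eq (A : List Int) (k : Int) (hA : A ≠ []) (hk : 1 ≤ k) :
    maximin_alt A k = (specCell A k.toNat (A.length - 1), specTable A (k+1).toNat A.length) := by
  have hn1 : 1 ≤ A.length := List.length_pos_iff.mpr hA
  simp only [maximin_alt]
  rw [P_eq]
  have hS : ∀ j, j ≤ A.length → ((List.range (A.length+1)).map (pref A)).getD j 0 = pref A j :=
    fun j hj => getD_map_range' _ _ j 0 (by omega)
  obtain ⟨h1, h2⟩ := tabfold A _ (k+1).toNat hS (List.range A.length)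
    (fun i hi => List.mem_range.mp hi) [] (List.replicate A.length (List.replicate (k+1).toNat none)) (memoOK_init A A.length (k+1).toNat)
  rw [h1, List.nil_append]
  have htab : (List.range A.length).map (specRow A (k+1).toNat) = specTable A (k+1).toNat A.length := rfl
  rw [htab]
  unfold specTable specRow get2
  rw [getD_map_range' _ _ (A.length - 1) [] (by omega),
    getD_map_range' _ _ k.toNat 0 (by omega)]

-- ===== A-side =====
theorem foldl_row_local {β : Type} (step : List Int → β → List Int) (l : List β) :
    ∀ (M : List (List Int)) (i : Nat), i < M.length → ∀ (r0 : List Int),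
    l.foldl (fun ps b => ps.set i (step (ps.getD i []) b)) (M.set i r0)
    = M.set i (l.foldl step r0) := by
  induction l with
  | nil => intro M i hi r0; simp
  | cons b l ih =>
    intro M i hi r0
    simp only [List.foldl_cons]
    rw [getD_set_self M i r0 [] hi, List.set_set]
    exact ih M i hi (step r0 b)

def psRowF (A : List Int) (n a : Nat) : List Int :=
  (List.range' (a+1) (n - (a+1))).foldl (fun r j => r.set j (r.getD (j-1) 0 + A.getD j 0))
    ((List.replicate n 0).set a (A.getD a 0))

theorem ps_eq (A : List Int) (n : Nat) (hn : n = A.length) :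
    (List.range n).foldl (fun ps i =>
      (List.range' (i+1) (n - (i+1))).foldl
        (fun ps j => set2 ps i j (get2 ps i (j-1) + A.getD j 0))
        (set2 ps i i (A.getD i 0))) (List.replicate n (List.replicate n 0))
    = (List.range n).map (psRowF A n) := by
  have aux : ∀ c, c ≤ n → (List.range c).foldl (fun ps i =>
      (List.range' (i+1) (n - (i+1))).foldl
        (fun ps j => set2 ps i j (get2 ps i (j-1) + A.getD j 0))
        (set2 ps i i (A.getD i 0))) (List.replicate n (List.replicate n 0))
      = (List.range n).map (fun a => if a < c then psRowF A n a else List.replicate n 0) := by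
    intro c
    induction c with
    | zero =>
      intro _
      simp only [List.range_zero, List.foldl_nil, Nat.not_lt_zero, if_false]
      rw [List.map_const', List.length_range]
    | succ c ih =>
      intro hc
      rw [List.range_succ, List.foldl_append, ih (by omega), List.foldl_cons, List.foldl_nil]
      have hcn : c < n := by omega
      have hrow : ((List.range n).map
          (fun a => if a < c then psRowF A n a else List.replicate n 0)).getD c [] =
          List.replicate n 0 := by
        rw [getD_map_range' _ n c [] hcn]; simp
      have hlen : c < ((List.range n).map
          (fun a => if a < c then psRowF A n a else List.replicate n 0)).length := by
        simp [hcn]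
      have hshape : (List.range' (c+1) (n-(c+1))).foldl
          (fun ps j => set2 ps c j (get2 ps c (j-1) + A.getD j 0))
          (set2 ((List.range n).map (fun a => if a < c then psRowF A n a else List.replicate n 0))
            c c (A.getD c 0))
          = ((List.range n).map (fun a => if a < c then psRowF A n a else List.replicate n 0)).set
            c (psRowF A n c) := by
      -- the loop body writes only row c: factor it into a fold on that row (definitional reshaping)
        have hinit : set2 ((List.range n).map
            (fun a => if a < c then psRowF A n a else List.replicate n 0)) c c (A.getD c 0)
            = ((List.range n).map (fun a => if a < c then psRowF A n a else List.replicate n 0)).set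
              c ((List.replicate n 0).set c (A.getD c 0)) := by
          unfold set2
          rw [hrow]
        rw [hinit]
        exact foldl_row_local (fun r j => r.set j (r.getD (j-1) 0 + A.getD j 0))
          (List.range' (c+1) (n-(c+1))) _ c hlen ((List.replicate n 0).set c (A.getD c 0))
      rw [hshape, set_map_range]
      refine List.map_congr_left (fun a ha => ?_)
      by_cases h1 : a = c
      · simp [h1]
      · have h2 : (a < c+1) ↔ (a < c) := by omega
        simp [h1, h2]
  rw [aux n le_rfl]
  exact List.map_congr_left (fun a ha => by
    simp only [List.mem_range] at ha
    simp [ha])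

theorem psRowF_getD (A : List Int) (n a : Nat) (hn : n = A.length) (ha : a < n) :
    ∀ b, a ≤ b → b < n → (psRowF A n a).getD b 0 = pref A (b+1) - pref A a := by
  have pref0 : pref A 0 = 0 := rfl
  have repl : ∀ b, (List.replicate n (0:Int)).getD b 0 = 0 := by
    intro b
    rw [List.getD_eq_getElem?_getD, List.getElem?_replicate]
    split <;> rfl
  have aux : ∀ c, c ≤ n - (a+1) →
      ((List.range' (a+1) c).foldl (fun r j => r.set j (r.getD (j-1) 0 + A.getD j 0))
        ((List.replicate n 0).set a (A.getD a 0))).length = n ∧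
      ∀ b, ((List.range' (a+1) c).foldl (fun r j => r.set j (r.getD (j-1) 0 + A.getD j 0))
        ((List.replicate n 0).set a (A.getD a 0))).getD b 0
        = if a ≤ b ∧ b ≤ a + c then pref A (b+1) - pref A a else 0 := by
    intro c
    induction c with
    | zero =>
      intro _
      constructor
      · simp
      · intro b
        simp only [List.range'_zero, List.foldl_nil]
        by_cases hb : b = a
        · subst hb
          rw [getD_set_self _ b _ 0 (by simp; omega)]
          rw [if_pos (by omega)]
          rw [pref_succ A b (by omega)]
          ring
        · rw [getD_set_ne _ a b _ 0 (fun h => hb h.symm), repl, if_neg (by omega)]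
    | succ c ih =>
      intro hc
      obtain ⟨ihl, ihg⟩ := ih (by omega)
      have hstep : (a+1) + 1 * c = a+1+c := by ring
      rw [List.range'_concat, hstep, List.foldl_append, List.foldl_cons, List.foldl_nil]
      have hacn : a+1+c < n := by omega
      constructor
      · rw [List.length_set, ihl]
      · intro b
        have hsub : a+1+c-1 = a+c := by omega
        rw [hsub]
        by_cases hb : b = a+1+c
        · subst hb
          rw [getD_set_self _ _ _ 0 (by rw [ihl]; omega)]
          rw [ihg (a+c), if_pos (by omega), if_pos (by omega)]
          rw [pref_succ A (a+1+c) (by omega)]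
          ring_nf
        · rw [getD_set_ne _ _ b _ 0 (fun h => hb h.symm), ihg b]
          by_cases h1 : a ≤ b ∧ b ≤ a + c
          · rw [if_pos h1, if_pos (by omega)]
          · rw [if_neg h1, if_neg (by omega)]
  intro b hab hbn
  unfold psRowF
  rw [(aux (n-(a+1)) le_rfl).2 b, if_pos (by omega)]

def row1 (A : List Int) (K i : Nat) : List Int := (List.replicate K 0).set 1 (pref A (i+1))

theorem F1_eq (A : List Int) (n K : Nat) (hn : n = A.length) (h1 : 1 ≤ n) (hK : 2 ≤ K) :
    (List.range' 1 (n-1)).foldl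
      (fun F i => set2 F i 1 (get2 F (i-1) 1 + A.getD i 0))
      (set2 (List.replicate n (List.replicate K 0)) 0 1 (A.getD 0 0))
    = (List.range n).map (row1 A K) := by
  have pref0 : pref A 0 = 0 := rfl
  have hmap0 : List.replicate n (List.replicate K (0:Int))
      = (List.range n).map (fun _ => List.replicate K (0:Int)) := by
    rw [List.map_const', List.length_range]
  have aux : ∀ c, c ≤ n - 1 →
      (List.range' 1 c).foldl (fun F i => set2 F i 1 (get2 F (i-1) 1 + A.getD i 0))
        (set2 (List.replicate n (List.replicate K 0)) 0 1 (A.getD 0 0))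
      = (List.range n).map (fun i => if i ≤ c then row1 A K i else List.replicate K 0) := by
    intro c
    induction c with
    | zero =>
      intro _
      simp only [List.range'_zero, List.foldl_nil]
      unfold set2
      rw [hmap0, getD_map_range' _ n 0 [] (by omega), set_map_range]
      refine List.map_congr_left (fun a ha => ?_)
      by_cases h1 : a = 0
      · subst h1
        have hx : A.getD 0 0 = pref A 1 := by rw [pref_succ A 0 (by omega), pref0]; ring
        rw [if_pos rfl, if_pos (Nat.le_refl 0)]
        unfold row1
        rw [hx]
      · have h2 : ¬ (a ≤ 0) := by omega
        simp [h1, h2]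
    | succ c ih =>
      intro hc
      have hstep : 1 + 1 * c = 1 + c := by ring
      rw [List.range'_concat, hstep, List.foldl_append, List.foldl_cons, List.foldl_nil,
        ih (by omega)]
      have hcn : c < n := by omega
      have h1cn : 1 + c < n := by omega
      have hsub : 1 + c - 1 = c := by omega
      have hget : get2 ((List.range n).map
          (fun i => if i ≤ c then row1 A K i else List.replicate K 0)) (1+c-1) 1
          = pref A (c+1) := by
        unfold get2
        rw [hsub, getD_map_range' _ n c [] hcn, if_pos (le_refl c)]
        unfold row1
        rw [getD_set_self _ 1 _ 0 (by simp; omega)]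
      have hrowc : ((List.range n).map
          (fun i => if i ≤ c then row1 A K i else List.replicate K 0)).getD (1+c) []
          = List.replicate K 0 := by
        rw [getD_map_range' _ n (1+c) [] h1cn, if_neg (by omega)]
      unfold set2
      rw [hget, hrowc, set_map_range]
      have hval : pref A (c+1) + A.getD (1+c) 0 = pref A (1+c+1) := by
        rw [pref_succ A (1+c) (by omega)]
        ring_nf
      rw [hval]
      refine List.map_congr_left (fun a ha => ?_)
      by_cases h1 : a = 1+c
      · subst h1
        simp [row1, if_pos (by omega : 1+c ≤ c+1)]
      · have h2 : (a ≤ c+1) ↔ (a ≤ c) := by omega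
        simp [h1, h2]
  rw [aux (n-1) le_rfl]
  exact List.map_congr_left (fun a ha => by
    simp only [List.mem_range] at ha
    rw [if_pos (by omega)])

-- partially-updated row c after columns 1..d of the main loop have been written
def prow (A : List Int) (K c d : Nat) : List Int :=
  (List.range K).map (fun s => if s = 0 then 0 else if s ≤ d then specCell A s c
    else if s = 1 then pref A (c+1) else 0)

theorem prow_zero (A : List Int) (K c : Nat) : row1 A K c = prow A K c 0 := by
  unfold row1 prow
  apply List.ext_getElem
  · simp
  · intro s h1 h2
    simp only [List.getElem_set, List.getElem_replicate, List.getElem_map, List.getElem_range]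
    by_cases h0 : s = 0
    · subst h0; simp
    · by_cases hs : s = 1
      · subst hs; simp
      · rw [if_neg (fun h => hs h.symm), if_neg h0, if_neg (by omega), if_neg hs]

theorem prow_set (A : List Int) (K c d : Nat) (_h : 1+d < K) :
    (prow A K c d).set (1+d) (specCell A (d+1) c) = prow A K c (d+1) := by
  unfold prow
  rw [set_map_range]
  refine List.map_congr_left (fun s hs => ?_)
  simp only [List.mem_range] at hs
  by_cases h1 : s = 1+d
  · subst h1
    rw [if_pos rfl, if_neg (by omega), if_pos (by omega)]
    congr 1
    omega
  · rw [if_neg h1]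
    by_cases h0 : s = 0
    · simp [h0]
    · by_cases h2 : s ≤ d
      · rw [if_neg h0, if_neg h0, if_pos h2, if_pos (by omega)]
      · have hs1 : s ≠ 1 := by omega
        rw [if_neg h0, if_neg h2, if_neg hs1, if_neg h0, if_neg (by omega : ¬ s ≤ d+1)]

theorem prow_top (A : List Int) (K c k' : Nat) (hK : K = k'+1) :
    prow A K c k' = specRow A K c := by
  unfold prow specRow
  refine List.map_congr_left (fun s hs => ?_)
  simp only [List.mem_range] at hs
  by_cases h0 : s = 0
  · subst h0; rfl
  · rw [if_neg h0, if_pos (by omega)]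

theorem jfold (c t : Nat) (S : Nat → Int) (l : List Nat) :
    ∀ (M : List (List Int)), c < M.length → t < (M.getD c []).length →
    (∀ j ∈ l, 1 ≤ j ∧ j ≤ c) →
    l.foldl (fun F j => set2 F c t (max (get2 F c t) (min (get2 F (c-j) (t-1)) (S j)))) M
    = set2 M c t (l.foldl (fun v j => max v (min (get2 M (c-j) (t-1)) (S j))) (get2 M c t)) := by
  induction l with
  | nil =>
    intro M hc ht _
    simp only [List.foldl_nil]
    unfold set2 get2
    rw [List.getD_eq_getElem?_getD (l := M.getD c [])]
    rw [List.getElem?_eq_getElem ht]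
    simp only [Option.getD_some]
    rw [List.set_getElem_self ht]
    rw [List.getD_eq_getElem?_getD, List.getElem?_eq_getElem hc]
    simp only [Option.getD_some]
    exact (List.set_getElem_self hc).symm
  | cons j l ih =>
    intro M hc ht hl
    simp only [List.foldl_cons]
    have hj := hl j (by simp)
    have hrow : c - j ≠ c := by omega
    set v1 := max (get2 M c t) (min (get2 M (c-j) (t-1)) (S j)) with hv1
    have hlen : c < (set2 M c t v1).length := by simp [set2, hc]
    have hrlen : t < ((set2 M c t v1).getD c []).length := by
      unfold set2
      rw [getD_set_self M c _ [] hc]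
      simpa using ht
    rw [ih (set2 M c t v1) hlen hrlen (fun j' hj' => hl j' (by simp [hj']))]
    have hget : get2 (set2 M c t v1) c t = v1 := by
      unfold get2 set2
      rw [getD_set_self M c _ [] hc, getD_set_self _ t v1 0 ht]
    have hread : ∀ j' ∈ l, get2 (set2 M c t v1) (c-j') (t-1) = get2 M (c-j') (t-1) := by
      intro j' hj'
      have := hl j' (by simp [hj'])
      unfold get2 set2
      rw [getD_set_ne M c (c-j') _ [] (by omega)]
    have hset : ∀ X, set2 (set2 M c t v1) c t X = set2 M c t X := by
      intro X
      unfold set2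
      rw [getD_set_self M c _ [] hc, List.set_set, List.set_set]
    rw [hget, hset]
    congr 1
    rw [PySem.List.foldl_congr_mem l _ _ v1 (fun acc j' hj' => by rw [hread j' hj'])]

theorem specCell_fold_range' (A : List Int) (c d : Nat) (init : Int) :
    (List.range' 1 c).foldl
      (fun v j => max v (min (specCell A d (c-j)) (pref A (c+1) - pref A (c-j+1)))) init
    = (List.range c).foldl
      (fun v m => max v (min (specCell A d m) (pref A (c+1) - pref A (m+1)))) init := by
  have h1 : (List.range' 1 c).foldl
      (fun v j => max v (min (specCell A d (c-j)) (pref A (c+1) - pref A (c-j+1)))) init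
      = ((List.range' 1 c).map (fun j => c - j)).foldl
      (fun v m => max v (min (specCell A d m) (pref A (c+1) - pref A (m+1)))) init := by
    rw [List.foldl_map]
  rw [h1]
  have h2 : (List.range' 1 c).map (fun j => c - j) = (List.range c).reverse := by
    rw [List.range'_eq_map_range, List.map_map]
    have hrev : (List.range c).reverse = List.map (fun x => c - 1 - x) (List.range c) := by
      rw [List.range_eq_range', List.reverse_range']
      simp [← List.range_eq_range']
    rw [hrev]
    exact List.map_congr_left (fun x hx => by simp only [Function.comp_apply]; omega)
  rw [h2]
  haveI : RightCommutative (fun (v : Int) m => max v (min (specCell A d m) (pref A (c+1) - pref A (m+1)))) :=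
    ⟨fun v m m' => max_right_comm ..⟩
  exact List.Perm.foldl_eq (List.reverse_perm (List.range c)) init

theorem main_eq (A : List Int) (n K : Nat) (k : Int) (hn : n = A.length) (_h1 : 1 ≤ n)
    (_hk : 1 ≤ k) (hK : K = k.toNat + 1) (ps : List (List Int))
    (hps : ∀ a b, a ≤ b → b < n → get2 ps a b = pref A (b+1) - pref A a) :
    (List.range n).foldl (fun F i =>
      (List.range' 1 k.toNat).foldl (fun F t =>
        (List.range' 1 i).foldl (fun F j =>
          set2 F i t (max (get2 F i t) (min (get2 F (i-j) (t-1)) (get2 ps (i-j+1) i)))) F) F)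
      ((List.range n).map (row1 A K))
    = specTable A K n := by
  have aux : ∀ c, c ≤ n → (List.range c).foldl (fun F i =>
      (List.range' 1 k.toNat).foldl (fun F t =>
        (List.range' 1 i).foldl (fun F j =>
          set2 F i t (max (get2 F i t) (min (get2 F (i-j) (t-1)) (get2 ps (i-j+1) i)))) F) F)
      ((List.range n).map (row1 A K))
      = (List.range n).map (fun i => if i < c then specRow A K i else row1 A K i) := by
    intro c
    induction c with
    | zero =>
      intro _
      simp only [List.range_zero, List.foldl_nil, Nat.not_lt_zero, if_false]
    | succ c ih =>
      intro hc
      rw [List.range_succ, List.foldl_append, ih (by omega), List.foldl_cons, List.foldl_nil]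
      have hcn : c < n := by omega
      have taux : ∀ d, d ≤ k.toNat →
          (List.range' 1 d).foldl (fun F t =>
            (List.range' 1 c).foldl (fun F j =>
              set2 F c t (max (get2 F c t) (min (get2 F (c-j) (t-1)) (get2 ps (c-j+1) c)))) F)
            ((List.range n).map (fun i => if i < c then specRow A K i else row1 A K i))
          = (List.range n).map (fun i => if i < c then specRow A K i
              else if i = c then prow A K c d else row1 A K i) := by
        intro d
        induction d with
        | zero =>
          intro _
          simp only [List.range'_zero, List.foldl_nil]
          refine List.map_congr_left (fun i hi => ?_)
          by_cases h1 : i < c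
          · rw [if_pos h1, if_pos h1]
          · by_cases h2 : i = c
            · subst h2
              rw [if_neg h1, if_neg h1, if_pos rfl, prow_zero]
            · rw [if_neg h1, if_neg h1, if_neg h2]
        | succ d ihd =>
          intro hd
          have hstep : 1 + 1 * d = 1 + d := by ring
          rw [List.range'_concat, hstep, List.foldl_append, List.foldl_cons, List.foldl_nil,
            ihd (by omega)]
          have hrowc : ((List.range n).map (fun i => if i < c then specRow A K i
              else if i = c then prow A K c d else row1 A K i)).getD c [] = prow A K c d := by
            rw [getD_map_range' _ n c [] hcn, if_neg (by omega), if_pos rfl]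
          have hlen : c < ((List.range n).map (fun i => if i < c then specRow A K i
              else if i = c then prow A K c d else row1 A K i)).length := by
            simp [hcn]
          have hrlen : 1+d < (((List.range n).map (fun i => if i < c then specRow A K i
              else if i = c then prow A K c d else row1 A K i)).getD c []).length := by
            rw [hrowc]
            unfold prow
            simp only [List.length_map, List.length_range]
            omega
          rw [jfold c (1+d) (fun j => get2 ps (c-j+1) c) (List.range' 1 c) _ hlen hrlen
            (fun j hj => by rw [List.mem_range'_1] at hj; omega)]
          have hstart : get2 ((List.range n).map (fun i => if i < c then specRow A K i
              else if i = c then prow A K c d else row1 A K i)) c (1+d)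
              = (if d = 0 then pref A (c+1) else 0) := by
            unfold get2
            rw [hrowc]
            unfold prow
            rw [getD_map_range' _ K (1+d) 0 (by omega)]
            by_cases h0 : d = 0
            · subst h0; norm_num
            · rw [if_neg (by omega), if_neg (by omega), if_neg (by omega), if_neg h0]
          rw [PySem.List.foldl_congr_mem _ _
            (fun v j => max v (min (specCell A d (c-j)) (pref A (c+1) - pref A (c-j+1)))) _
            (fun acc j hj => by
              rw [List.mem_range'_1] at hj
              have h1 : 1+d-1 = d := by omega
              rw [h1]
              have hrd : get2 ((List.range n).map (fun i => if i < c then specRow A K i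
                  else if i = c then prow A K c d else row1 A K i)) (c-j) d
                  = specCell A d (c-j) := by
                unfold get2
                rw [getD_map_range' _ n (c-j) [] (by omega), if_pos (by omega)]
                unfold specRow
                rw [getD_map_range' _ K d 0 (by omega)]
              rw [hrd, hps (c-j+1) c (by omega) (by omega)])]
          rw [hstart, specCell_fold_range' A c d]
          have hcell : (List.range c).foldl
              (fun v m => max v (min (specCell A d m) (pref A (c+1) - pref A (m+1))))
              (if d = 0 then pref A (c+1) else 0) = specCell A (d+1) c := by
            simp only [specCell]
          rw [hcell]
          unfold set2
          rw [hrowc, set_map_range]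
          refine List.map_congr_left (fun a ha => ?_)
          by_cases h1 : a = c
          · subst h1
            rw [if_pos rfl, if_neg (lt_irrefl a), if_pos rfl]
            exact prow_set A K a d (by omega)
          · by_cases h2 : a < c
            · rw [if_neg h1, if_pos h2, if_pos h2]
            · rw [if_neg h1, if_neg h2, if_neg h1, if_neg h2, if_neg h1]
      rw [taux k.toNat le_rfl]
      refine List.map_congr_left (fun a ha => ?_)
      simp only [List.mem_range] at ha
      by_cases h1 : a < c
      · rw [if_pos h1, if_pos (by omega)]
      · by_cases h2 : a = c
        · subst h2
          rw [if_neg h1, if_pos rfl, if_pos (by omega), prow_top A K a k.toNat hK]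
        · rw [if_neg h1, if_neg h2, if_neg (by omega)]
  rw [aux n le_rfl]
  unfold specTable
  refine List.map_congr_left (fun a ha => ?_)
  simp only [List.mem_range] at ha
  rw [if_pos ha]

theorem a_eq (A : List Int) (k : Int) (hA : A ≠ []) (hk : 1 ≤ k) :
    maximin A k = (specCell A k.toNat (A.length - 1), specTable A (k+1).toNat A.length) := by
  have hn1 : 1 ≤ A.length := List.length_pos_iff.mpr hA
  have hK2 : 2 ≤ (k+1).toNat := by omega
  have hKk : (k+1).toNat = k.toNat + 1 := by omega
  have hps' : ∀ a b, a ≤ b → b < A.length →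
      get2 ((List.range A.length).map (psRowF A A.length)) a b = pref A (b+1) - pref A a := by
    intro a b hab hb
    unfold get2
    rw [getD_map_range' _ _ a [] (by omega)]
    exact psRowF_getD A A.length a rfl (by omega) b hab hb
  simp only [maximin]
  rw [ps_eq A A.length rfl]
  rw [F1_eq A A.length (k+1).toNat rfl hn1 hK2]
  rw [main_eq A A.length (k+1).toNat k rfl hn1 hk hKk _ hps']
  unfold specTable specRow get2
  rw [getD_map_range' _ _ (A.length - 1) [] (by omega),
    getD_map_range' _ _ k.toNat 0 (by omega)]

-- ===== VERDICT (by name: the statement is the Claim_ definition above) =====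
theorem maximin_spec : Claim_equal_maximin := by
  intro A k _ hpre
  unfold Spec_maximin
  rw [a_eq A k hpre.1 hpre.2, alt_eq A k hpre.1 hpre.2]
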